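-- pv_equiv track=rewrite | github.com/MrBrantCode/unitest_baseline | mut_generate/mist_train_cf/cf_56003/solution.py | shift_letters
-- ===== SOURCE A (Python) =====
-- def shift_letters(text):
--     result = ""
--     for char in text:
--         if char.isalpha():
--             # Start with Z or z for looping the alphabet
--             if char.lower() == 'z':
--                 result += 'a' if char.islower() else 'A'
--             else:
--                 result += chr(ord(char) + 1)
--         else:
--             result += char
--
--     return result
-- ===== SOURCE B (Python) =====
-- _SRC = "abcdefghijklmnopqrstuvwxyzABCDEFGHIJKLMNOPQRSTUVWXYZ"
-- _DST = _SRC[1:26] + _SRC[0] + _SRC[27:] + _SRC[26]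
-- _TABLE = str.maketrans(_SRC, _DST)
--
-- def shift_letters(text):
--     return text.translate(_TABLE)
-- ===== Notes on version B (the rewrite author's own statement) =====
-- stated objective: idiomatic
-- what changed: B precomputes a rotated-alphabet translation table once (str.maketrans) and returns text.translate(table) in one call, replacing A's per-character if/else chain and repeated string concatenation.
import Mathlib
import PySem

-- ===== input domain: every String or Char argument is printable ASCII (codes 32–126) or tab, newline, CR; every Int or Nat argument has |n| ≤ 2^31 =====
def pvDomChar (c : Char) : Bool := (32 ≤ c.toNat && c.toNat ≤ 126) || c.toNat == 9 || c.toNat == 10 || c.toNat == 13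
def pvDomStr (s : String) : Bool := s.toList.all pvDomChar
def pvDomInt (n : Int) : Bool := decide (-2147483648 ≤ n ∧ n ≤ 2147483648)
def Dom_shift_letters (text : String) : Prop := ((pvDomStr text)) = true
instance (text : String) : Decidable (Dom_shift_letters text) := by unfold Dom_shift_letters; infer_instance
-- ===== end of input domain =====

-- B replaces A's per-character if/else concatenation loop by a precomputed rotated-alphabet
-- translation table applied with a single translate/map pass (idiomatic; same linear cost).


-- ===== PORT A =====
-- one iteration of A's loop body: the branch on isalpha / 'z' / islower
def shiftStepA (c : Char) : Char :=
  if PySem.Chars.isalpha c then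
    if PySem.Chars.lowerChar c == 'z' then
      (if PySem.Chars.islower c then 'a' else 'A')
    else Char.ofNat (c.toNat + 1)
  else c

def shift_letters (text : String) : String :=
  -- result = ""; for char in text: result += …  (string built by appending, on the List Char side)
  String.ofList (text.toList.foldl (fun acc c => acc ++ [shiftStepA c]) [])

-- ===== PORT B =====
-- the 52-entry translation table built once from the rotated alphabets (str.maketrans(_SRC, _DST))
def shiftSrc : List Char := "abcdefghijklmnopqrstuvwxyzABCDEFGHIJKLMNOPQRSTUVWXYZ".toList
def shiftDst : List Char :=
  PySem.Chars.slice shiftSrc (some 1) (some 26) ++ [shiftSrc.headD ' ']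
    ++ PySem.Chars.slice shiftSrc (some 27) none ++ [PySem.List.pyGetD shiftSrc 26 ' ']
def shiftTable : PySem.Dict Char Char :=
  (shiftSrc.zip shiftDst).foldl (fun d p => d.insert p.1 p.2) PySem.Dict.empty

def shift_letters_alt (text : String) : String :=
  -- text.translate(_TABLE): each char mapped through the table, absent chars unchanged
  String.ofList (text.toList.map (fun c => shiftTable.getD c c))

-- ===== PRECONDITION & SPEC =====
def Spec_shift_letters (text : String) (out : String) : Prop := out = shift_letters_alt text
instance (text : String) (out : String) : Decidable (Spec_shift_letters text out) := by unfold Spec_shift_letters; infer_instance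

-- ===== CLAIM (what is proved, stated in full; the proofs are below) =====
def Claim_equal_shift_letters : Prop := ∀ (text : String), Dom_shift_letters text → Spec_shift_letters text (shift_letters text)

-- ===== LEMMAS AND PROOFS =====
-- the two per-character transforms agree on every ASCII character (all Dom characters)
set_option maxRecDepth 4096 in
theorem step_eq_lookup (n : Nat) (h : n < 128) :
    shiftStepA (Char.ofNat n) = shiftTable.getD (Char.ofNat n) (Char.ofNat n) := by
  interval_cases n <;> decide

theorem step_eq_lookup' (c : Char) (h : pvDomChar c = true) :
    shiftStepA c = shiftTable.getD c c := by
  have hn : c.toNat < 128 := by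
    simp [pvDomChar] at h; omega
  have := step_eq_lookup c.toNat hn
  rwa [Char.ofNat_toNat] at this

-- ===== VERDICT (by name: the statement is the Claim_ definition above) =====
set_option maxRecDepth 4096 in
theorem shift_letters_spec : Claim_equal_shift_letters := by
  intro text hdom
  unfold Spec_shift_letters shift_letters shift_letters_alt
  rw [PySem.List.foldl_append_singleton_eq_map]
  congr 1
  refine List.map_congr_left (fun c hc => step_eq_lookup' c ?_)
  have := hdom
  unfold Dom_shift_letters pvDomStr at this
  exact List.all_eq_true.mp this c hc
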